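-- pv_equiv track=rewrite | github.com/EvilPort2/final-year-project | gesture_recognition/gesture_action.py | process_created_gesture
-- ===== SOURCE A (Python) =====
-- def process_created_gesture(created_gesture):
--     """
--     function to remove all the St direction and removes duplicate direction if they
--     occur consecutively.
--     """
--     if created_gesture != []:
--         for i in range(created_gesture.count("St")):
--             created_gesture.remove("St")
--         for i in range(created_gesture.count(None)):
--             created_gesture.remove(None)
--
--         for j in range(len(created_gesture)):
--             for i in range(len(created_gesture) - 1):
--                 if created_gesture[i] == created_gesture[i+1]:
--                     del created_gesture[i+1]
--                     break
--     return created_gesture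
-- ===== SOURCE B (Python) =====
-- def process_created_gesture(created_gesture):
--     """
--     Single pass: drop "St" and None, and keep an element only if it differs
--     from the previously kept one.
--     (A mutates its argument in place; B does not -- equivalence is about the
--     return value only.)
--     """
--     out = []
--     for x in created_gesture:
--         if x == "St" or x is None:
--             continue
--         if not out or out[-1] != x:
--             out.append(x)
--     return out
-- ===== Notes on version B (the rewrite author's own statement) =====
-- stated objective: faster
-- what changed: Replaced the repeated remove() loops and the quadratic delete-one-adjacent-duplicate-per-outer-pass loop by a single left-to-right pass that filters 'St'/None and appends an element only when it differs from the last kept one.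
import Mathlib
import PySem

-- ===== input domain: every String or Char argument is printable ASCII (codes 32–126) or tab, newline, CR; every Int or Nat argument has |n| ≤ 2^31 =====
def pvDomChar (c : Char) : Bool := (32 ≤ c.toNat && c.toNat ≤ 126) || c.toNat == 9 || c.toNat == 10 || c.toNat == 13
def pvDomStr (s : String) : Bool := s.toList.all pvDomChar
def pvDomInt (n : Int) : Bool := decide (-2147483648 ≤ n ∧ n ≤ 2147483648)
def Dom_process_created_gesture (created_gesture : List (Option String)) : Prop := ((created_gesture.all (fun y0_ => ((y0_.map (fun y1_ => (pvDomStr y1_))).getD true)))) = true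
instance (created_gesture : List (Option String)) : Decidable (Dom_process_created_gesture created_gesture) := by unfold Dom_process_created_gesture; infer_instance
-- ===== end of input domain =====

-- B changes the algorithm: one linear pass replacing A's repeated remove() loops and
-- quadratic duplicate-deletion passes. A mutates its argument in place; B does not —
-- the equivalence proved here is about the return value only.

-- ===== PORT A =====
-- inner 'for i in range(len-1): if g[i]==g[i+1]: del g[i+1]; break' — deletes the
-- first adjacent duplicate (if any) and stops; exact transcription of that scan
def pvDelFirstDup : List (Option String) → List (Option String)
  | a :: b :: t => if a = b then a :: t else a :: pvDelFirstDup (b :: t)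
  | l => l

-- 'for i in range(g.count(v)): g.remove(v)' — remove always succeeds here, so getD is exact
def pvRemoveLoop (v : Option String) (g : List (Option String)) : List (Option String) :=
  (PySem.List.pyRange 0 (PySem.List.count g v : Int) 1).foldl
    (fun l _ => (PySem.List.remove? l v).getD l) g

-- 'for j in range(len(g)): <inner scan above>'
def pvDedupLoop (g : List (Option String)) : List (Option String) :=
  (PySem.List.pyRange 0 (g.length : Int) 1).foldl (fun l _ => pvDelFirstDup l) g

def process_created_gesture (created_gesture : List (Option String)) : List (Option String) :=
  if created_gesture ≠ [] then
    pvDedupLoop (pvRemoveLoop none (pvRemoveLoop (some "St") created_gesture))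
  else created_gesture

-- ===== PORT B =====
def pvSkip (x : Option String) : Bool := x == some "St" || x == none

def process_created_gesture_alt (created_gesture : List (Option String)) : List (Option String) :=
  created_gesture.foldl (fun out x =>
    if pvSkip x then out
    else if out = [] || !(PySem.List.pyGet? out (-1) == some x) then out ++ [x]
    else out) []

-- ===== PRECONDITION & SPEC =====
def Spec_process_created_gesture (created_gesture : List (Option String)) (out : List (Option String)) : Prop := out = process_created_gesture_alt created_gesture
instance (created_gesture : List (Option String)) (out : List (Option String)) : Decidable (Spec_process_created_gesture created_gesture out) := by unfold Spec_process_created_gesture; infer_instance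

-- ===== CLAIM (what is proved, stated in full; the proofs are below) =====
def Claim_equal_process_created_gesture : Prop := ∀ (created_gesture : List (Option String)), Dom_process_created_gesture created_gesture → Spec_process_created_gesture created_gesture (process_created_gesture created_gesture)

-- ===== LEMMAS AND PROOFS =====

-- canonical result: collapse consecutive duplicates of the skip-filtered list, given the last kept element
def pvColPrev (prev : Option (Option String)) : List (Option String) → List (Option String)
  | [] => []
  | x :: t => if prev = some x then pvColPrev prev t else x :: pvColPrev (some x) t

-- B's fold equals pvColPrev on the filtered list
lemma pvB_eq (l : List (Option String)) (acc : List (Option String)) :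
    l.foldl (fun out x =>
      if pvSkip x then out
      else if out = [] || !(PySem.List.pyGet? out (-1) == some x) then out ++ [x]
      else out) acc = acc ++ pvColPrev acc.getLast? (l.filter (fun x => !pvSkip x)) := by
  induction l generalizing acc with
  | nil => simp [pvColPrev]
  | cons x t ih =>
    rw [List.foldl_cons]
    by_cases hs : pvSkip x
    · rw [if_pos hs, ih]
      simp [hs]
    · rw [if_neg hs]
      rw [PySem.List.pyGet?_neg_one]
      by_cases hl : acc.getLast? = some x
      · have hne : acc ≠ [] := by rintro rfl; simp at hl
        rw [if_neg (by simp [hne, hl]), ih]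
        simp [hs, pvColPrev, hl]
      · rw [if_pos (by cases h : acc.getLast? <;> simp_all), ih]
        simp [hs, pvColPrev, hl]

lemma pvFilter_erase (a : Option String) (l : List (Option String)) :
    (l.erase a).filter (fun x => !(x == a)) = l.filter (fun x => !(x == a)) := by
  induction l with
  | nil => rfl
  | cons x t ih =>
    by_cases h : x = a
    · subst h; simp [List.erase_cons_head]
    · simp [List.erase_cons_tail, h, ih]

-- A's removal loop removes every occurrence
lemma pvRemove_loop (a : Option String) (r : List Int) (l : List (Option String))
    (h : l.count a = r.length) :
    r.foldl (fun l _ => (PySem.List.remove? l a).getD l) l = l.filter (fun x => !(x == a)) := by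
  induction r generalizing l with
  | nil =>
    simp only [List.length_nil] at h
    have hnm : a ∉ l := by
      intro hm
      have := List.count_pos_iff.mpr hm
      omega
    rw [List.foldl_nil, List.filter_eq_self.mpr]
    intro x hx
    simp only [Bool.not_eq_eq_eq_not, Bool.not_true, beq_eq_false_iff_ne]
    exact fun he => hnm (he ▸ hx)
  | cons i r ih =>
    simp only [List.length_cons] at h
    have hm : a ∈ l := List.count_pos_iff.mp (by omega)
    rw [List.foldl_cons, PySem.List.remove?_eq_some_erase l a hm, Option.getD_some, ih]
    · exact pvFilter_erase a l
    · have hce : List.count a (l.erase a) = List.count a l - 1 := List.count_erase_self ..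
      omega

-- pvDelFirstDup keeps the head
lemma pvDfd_cons (b : Option String) (t : List (Option String)) :
    ∃ rest, pvDelFirstDup (b :: t) = b :: rest := by
  cases t with
  | nil => exact ⟨[], rfl⟩
  | cons c t' =>
    by_cases h : b = c
    · exact ⟨t', by simp [pvDelFirstDup, h]⟩
    · exact ⟨pvDelFirstDup (c :: t'), by simp [pvDelFirstDup, h]⟩

-- a prev that differs from the head acts like none
lemma pvColPrev_fresh (a : Option String) {b : Option String} {t : List (Option String)}
    (hab : ¬ a = b) : pvColPrev (some a) (b :: t) = pvColPrev none (b :: t) := by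
  simp [pvColPrev, hab]

-- one step of the dedup pass: either a fixpoint (and already collapsed) or it shrinks and preserves pvColPrev
lemma pvDfd_key (l : List (Option String)) :
    (pvDelFirstDup l = l ∧ pvColPrev none l = l) ∨
    ((pvDelFirstDup l).length + 1 = l.length ∧ pvColPrev none (pvDelFirstDup l) = pvColPrev none l) := by
  induction l using pvDelFirstDup.induct with
  | case1 b t =>
    right
    constructor
    · simp [pvDelFirstDup]
    · simp [pvDelFirstDup, pvColPrev]
  | case2 a b t hab ih =>
    obtain ⟨rest, hr⟩ := pvDfd_cons b t
    rcases ih with ⟨h1, h2⟩ | ⟨h1, h2⟩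
    · left
      refine ⟨by simp [pvDelFirstDup, hab, h1], ?_⟩
      rw [show pvColPrev none (a :: b :: t) = a :: pvColPrev (some a) (b :: t) by
            simp [pvColPrev],
          pvColPrev_fresh a hab, h2]
    · right
      constructor
      · have h1' := h1
        simp only [pvDelFirstDup, if_neg hab, List.length_cons] at h1' ⊢
        omega
      · simp only [pvDelFirstDup, if_neg hab]
        rw [show pvColPrev none (a :: pvDelFirstDup (b :: t)) =
              a :: pvColPrev (some a) (pvDelFirstDup (b :: t)) by simp [pvColPrev]]
        rw [hr, pvColPrev_fresh a hab, ← hr, h2,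
            show pvColPrev none (a :: b :: t) = a :: pvColPrev (some a) (b :: t) by
              simp [pvColPrev],
            pvColPrev_fresh a hab]
  | case3 l hne =>
    left
    match l, hne with
    | [], _ => exact ⟨rfl, rfl⟩
    | [x], _ => exact ⟨rfl, by simp [pvColPrev]⟩
    | a :: b :: t, hne => exact absurd (hne a b t rfl) (by simp)

lemma pvDfd_fix (r : List Int) (l : List (Option String)) (h : pvDelFirstDup l = l) :
    r.foldl (fun l _ => pvDelFirstDup l) l = l := by
  induction r generalizing l with
  | nil => rfl
  | cons i r ih => simpa [List.foldl, h] using ih l h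

lemma pvDedup_loop (r : List Int) (l : List (Option String)) (h : l.length ≤ r.length) :
    r.foldl (fun l _ => pvDelFirstDup l) l = pvColPrev none l := by
  induction r generalizing l with
  | nil =>
    have : l = [] := by
      cases l with
      | nil => rfl
      | cons a t => simp at h
    subst this; rfl
  | cons i r ih =>
    rcases pvDfd_key l with ⟨h1, h2⟩ | ⟨h1, h2⟩
    · rw [List.foldl_cons, h1, pvDfd_fix r l h1, h2]
    · rw [List.foldl_cons, ih (pvDelFirstDup l) (by simp at h ⊢; omega), h2]

-- ===== VERDICT (by name: the statement is the Claim_ definition above) =====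
theorem process_created_gesture_spec : Claim_equal_process_created_gesture := by
  unfold Claim_equal_process_created_gesture Spec_process_created_gesture
  intro g _
  unfold process_created_gesture process_created_gesture_alt
  rw [pvB_eq]
  by_cases hg : g = []
  · subst hg; rfl
  · rw [if_pos hg]
    have hlen : ∀ (n : Nat), (PySem.List.pyRange 0 (n : Int) 1).length = n := by
      intro n
      rw [PySem.List.length_pyRange_one]
      omega
    unfold pvDedupLoop pvRemoveLoop
    rw [pvRemove_loop _ _ _ (by simp [PySem.List.count_eq, hlen])]
    rw [pvRemove_loop _ _ _ (by simp [PySem.List.count_eq, hlen])]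
    rw [pvDedup_loop _ _ (by simp [hlen])]
    simp only [List.nil_append, List.getLast?_nil, List.filter_filter]
    congr 1
    apply List.filter_congr
    intro x _
    cases x with
    | none => simp [pvSkip]
    | some s => simp [pvSkip]
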